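-- pv_equiv track=rewrite | github.com/asaf693/Boggle-Game | board.py | check_env
-- ===== SOURCE A (Python) =====
-- def check_env(path):
--     """
--     :param path: A list of tuples with the coordinates of the path.
--     :return: True if the env of each coordinate in the path is valid, else
--     returns False.
--     """
--     for p in range(1, len(path)):
--         env_lst = []
--         for row in range(-1, 2):
--             for col in range(-1, 2):
--                 x, y = path[p - 1][0] + row, path[p - 1][1] + col
--                 if (x, y) != path[p - 1]:
--                     env_lst.append((x, y))
--         if path[p] not in env_lst:
--             return False
--     return True
-- ===== SOURCE B (Python) =====
-- def check_env(path):
--     for a, b in zip(path, path[1:]):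
--         if max(abs(b[0] - a[0]), abs(b[1] - a[1])) != 1:
--             return False
--     return True
-- ===== Notes on version B (the rewrite author's own statement) =====
-- stated objective: simpler
-- what changed: Replaced the construction of the 8-neighbour list plus a membership test with a direct Chebyshev-distance check (max(|dx|,|dy|) == 1) over consecutive pairs from zip.
import Mathlib
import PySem

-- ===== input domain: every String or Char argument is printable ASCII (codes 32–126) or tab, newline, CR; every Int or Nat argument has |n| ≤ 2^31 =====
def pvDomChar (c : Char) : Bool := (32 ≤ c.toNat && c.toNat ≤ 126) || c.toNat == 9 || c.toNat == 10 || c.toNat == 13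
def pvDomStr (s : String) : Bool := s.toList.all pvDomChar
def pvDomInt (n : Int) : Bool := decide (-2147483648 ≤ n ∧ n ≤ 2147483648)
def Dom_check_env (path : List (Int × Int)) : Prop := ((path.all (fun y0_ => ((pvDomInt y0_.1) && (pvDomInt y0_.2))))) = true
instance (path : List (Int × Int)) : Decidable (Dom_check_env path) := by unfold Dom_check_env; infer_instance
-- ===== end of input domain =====

-- B replaces A's 8-neighbour-list construction plus membership test by a direct
-- Chebyshev-distance check max(|dx|,|dy|) == 1 over consecutive pairs (simpler).

-- ===== PORT A =====
-- env_lst built for path[p-1]: the two nested range(-1,2) loops appending every cell ≠ path[p-1]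
def check_env_env (prev : Int × Int) : List (Int × Int) :=
  (PySem.List.pyRange (-1) 2 1).foldl (fun acc row =>
    (PySem.List.pyRange (-1) 2 1).foldl (fun acc2 col =>
      let xy : Int × Int := (prev.1 + row, prev.2 + col)
      if xy ≠ prev then acc2 ++ [xy] else acc2) acc) []

-- the outer 'for p in range(1, len(path))' loop with its early 'return False'
def check_env_go (path : List (Int × Int)) : List Int → Bool
  | [] => true
  | p :: rest =>
    match PySem.List.pyGet? path (p - 1), PySem.List.pyGet? path p with
    | some prev, some cur =>
        if cur ∈ check_env_env prev then check_env_go path rest else false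
    | _, _ => false  -- unreachable: p and p-1 are in range

def check_env (path : List (Int × Int)) : Bool :=
  check_env_go path (PySem.List.pyRange 1 (path.length : Int) 1)

-- ===== PORT B =====
-- 'for a, b in zip(path, path[1:])' with early 'return False'
def check_env_alt_go : List ((Int × Int) × (Int × Int)) → Bool
  | [] => true
  | (a, b) :: rest =>
      if max (b.1 - a.1).natAbs (b.2 - a.2).natAbs ≠ 1 then false
      else check_env_alt_go rest

def check_env_alt (path : List (Int × Int)) : Bool :=
  check_env_alt_go (path.zip (PySem.List.slice path (some 1) none))

-- ===== PRECONDITION & SPEC =====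
def Spec_check_env (path : List (Int × Int)) (out : Bool) : Prop := out = check_env_alt path
instance (path : List (Int × Int)) (out : Bool) : Decidable (Spec_check_env path out) := by unfold Spec_check_env; infer_instance

-- ===== CLAIM (what is proved, stated in full; the proofs are below) =====
def Claim_equal_check_env : Prop := ∀ (path : List (Int × Int)), Dom_check_env path → Spec_check_env path (check_env path)

-- ===== LEMMAS AND PROOFS =====
-- membership in A's env list is exactly B's Chebyshev condition
lemma mem_check_env_env (prev cur : Int × Int) :
    (cur ∈ check_env_env prev) ↔ max (cur.1 - prev.1).natAbs (cur.2 - prev.2).natAbs = 1 := by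
  obtain ⟨a, b⟩ := prev
  obtain ⟨c, d⟩ := cur
  have h : PySem.List.pyRange (-1) 2 1 = [-1, 0, 1] := by decide
  simp only [check_env_env, h, List.foldl, Prod.ext_iff, ne_eq]
  simp [Prod.ext_iff]
  omega

-- the index loop from k+1 equals B's pair loop on the suffix from k
lemma check_env_go_drop (path : List (Int × Int)) :
    ∀ (m k : Nat), path.length - k = m →
      check_env_go path (PySem.List.pyRange ((k : Int) + 1) (path.length : Int) 1) =
        check_env_alt_go ((path.drop k).zip (path.drop (k + 1))) := by
  intro m
  induction m with
  | zero =>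
      intro k hk
      have hlen : path.length ≤ k := by omega
      rw [PySem.List.pyRange_one_eq_nil (by exact_mod_cast Nat.le_succ_of_le hlen)]
      rw [List.drop_eq_nil_of_le hlen]
      simp [check_env_go, check_env_alt_go]
  | succ m ih =>
      intro k hk
      have hklt : k < path.length := by omega
      by_cases hk1 : k + 1 = path.length
      · rw [PySem.List.pyRange_one_eq_nil (by exact_mod_cast le_of_eq hk1.symm)]
        rw [List.drop_eq_nil_of_le (le_of_eq hk1.symm)]
        simp [check_env_go, check_env_alt_go]
      · have hk1lt : k + 1 < path.length := by omega
        rw [PySem.List.pyRange_one_cons (by exact_mod_cast hk1lt)]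
        have e1 : ((k : Int) + 1) - 1 = (k : Int) := by ring
        have e2 : ((k : Int) + 1) = ((k + 1 : Nat) : Int) := by push_cast; ring
        have e1' : ((k + 1 : Nat) : Int) - 1 = (k : Int) := by push_cast; ring
        simp only [check_env_go, e2, e1', PySem.List.pyGet?_natCast,
          List.getElem?_eq_getElem hklt, List.getElem?_eq_getElem hk1lt]
        rw [List.drop_eq_getElem_cons hklt, List.drop_eq_getElem_cons hk1lt]
        simp only [List.zip_cons_cons, check_env_alt_go]
        have e3 : ((k + 1 : Nat) : Int) + 1 = ((k + 1 + 1 : Nat) : Int) := by push_cast; ring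
        rw [show (k + 1) + 1 = k + 2 from rfl] at *
        by_cases hmem : path[k + 1] ∈ check_env_env path[k]
        · rw [if_pos hmem, if_neg (by simp [(mem_check_env_env _ _).mp hmem])]
          calc check_env_go path (PySem.List.pyRange ((k : Int) + 1 + 1) (path.length : Int) 1)
              = check_env_go path (PySem.List.pyRange (((k + 1 : Nat) : Int) + 1) (path.length : Int) 1) := by
                rw [show (k : Int) + 1 + 1 = ((k + 1 : Nat) : Int) + 1 by push_cast; ring]
            _ = check_env_alt_go ((path.drop (k + 1)).zip (path.drop (k + 2))) := ih (k + 1) (by omega)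
            _ = check_env_alt_go ((path[k + 1] :: path.drop (k + 2)).zip (path.drop (k + 2))) := by
                rw [List.drop_eq_getElem_cons hk1lt]
        · rw [if_neg hmem, if_pos (by simpa using (mem_check_env_env (path[k]) (path[k + 1])).not.mp hmem)]

-- ===== VERDICT (by name: the statement is the Claim_ definition above) =====
theorem check_env_spec : Claim_equal_check_env := by
  intro path _
  unfold Spec_check_env check_env check_env_alt
  rw [PySem.List.slice_from_one]
  have := check_env_go_drop path (path.length - 0) 0 rfl
  simpa using this
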